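-- pv_equiv track=rewrite | github.com/belozi/Python-Programs | MITx 6.00.1x/problem_set_6/part_1b.py | applyCoder
-- ===== SOURCE A (Python) =====
-- import string
--
-- def applyCoder(text, coder):
--     """
--     Applies the coder to the text. Returns the encoded text.
--
--     text: string
--     coder: dict with mappings of characters to shifted characters
--     returns: text after mapping coder chars to original text
--     """
--     chars = []
--
--     for letter in text:
--         if letter == "," or letter in string.digits:
--             chars.append(letter)
--         elif letter in string.punctuation or letter ==" ":
--             chars.append(letter)
--         else:
--             chars.append(coder[letter])
--
--     return ''.join(chars)
-- ===== SOURCE B (Python) =====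
-- import string
--
-- _KEEP = set(string.punctuation + string.digits + " ")
--
-- def applyCoder(text, coder):
--     # Memoize the image of each DISTINCT character once, then do one C-level
--     # translate pass instead of a per-character Python loop with branches.
--     table = str.maketrans({c: (c if c in _KEEP else coder[c]) for c in set(text)})
--     return text.translate(table)
-- ===== Notes on version B (the rewrite author's own statement) =====
-- stated objective: alternative
-- what changed: B first memoizes the coded image of each DISTINCT character of the text (iterating over set(text), not over the text), builds a str.maketrans table from it, and then applies the whole mapping in one str.translate call; A loops over every character with three membership-test branches.
import Mathlib
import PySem

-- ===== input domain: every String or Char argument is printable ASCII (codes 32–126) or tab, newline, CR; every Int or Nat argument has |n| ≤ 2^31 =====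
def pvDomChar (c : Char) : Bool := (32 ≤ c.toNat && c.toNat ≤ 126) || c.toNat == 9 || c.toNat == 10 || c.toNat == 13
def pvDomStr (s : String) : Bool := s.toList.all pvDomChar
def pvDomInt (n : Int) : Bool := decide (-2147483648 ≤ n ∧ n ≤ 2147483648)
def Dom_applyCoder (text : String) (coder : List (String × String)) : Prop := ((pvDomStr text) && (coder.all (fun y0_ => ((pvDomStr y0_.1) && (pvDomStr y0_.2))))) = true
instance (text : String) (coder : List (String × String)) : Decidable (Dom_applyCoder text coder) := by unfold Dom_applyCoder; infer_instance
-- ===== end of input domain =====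

-- B memoizes the coded image of each DISTINCT character of the text and applies the
-- whole mapping in one translate pass, instead of A's per-character branch loop
-- (alternative decomposition; no speed claim).

-- string.digits
def pyDigits : List Char := ['0', '1', '2', '3', '4', '5', '6', '7', '8', '9']
-- string.punctuation
def pyPunct : List Char := ['!', '\"', '#', '$', '%', '&', '\'', '(', ')', '*', '+', ',', '-', '.', '/', ':', ';', '<', '=', '>', '?', '@', '[', '\\', ']', '^', '_', '`', '{', '|', '}', '~']

-- ===== PORT A =====
-- 'letter in string.digits' for the 1-char letter is exactly list membership of the char.
-- coder[letter] raising KeyError is excluded by Pre_; the port writes "" there.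
def applyCoder (text : String) (coder : List (String × String)) : String :=
  let d : PySem.Dict String String := PySem.Dict.ofList coder
  let chars : List String :=
    text.toList.foldl (fun chars letter =>
      if letter = ',' ∨ letter ∈ pyDigits then chars ++ [String.ofList [letter]]
      else if letter ∈ pyPunct ∨ letter = ' ' then chars ++ [String.ofList [letter]]
      else chars ++ [(d.get? (String.ofList [letter])).getD ""]) []
  String.join chars

-- ===== PORT B =====
-- _KEEP = set(string.punctuation + string.digits + " ")
def keepSet : PySem.Set Char := PySem.Set.ofList (pyPunct ++ pyDigits ++ [' '])

-- table = {c: (c if c in _KEEP else coder[c]) for c in set(text)}; text.translate(table).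
-- The comprehension over set(text) is ported as a fold over PySem.Set.ofList building a
-- Dict that is only looked up afterwards (order-independent, exact); coder[c] raising
-- KeyError is excluded by Pre_; the port writes "" there. translate leaves a character
-- absent from the table unchanged, hence the getD default of the character itself.
def applyCoder_alt (text : String) (coder : List (String × String)) : String :=
  let d : PySem.Dict String String := PySem.Dict.ofList coder
  let table : PySem.Dict Char String :=
    (PySem.Set.ofList text.toList).foldl (fun t c =>
      t.insert c (if c ∈ keepSet then String.ofList [c]
                  else (d.get? (String.ofList [c])).getD "")) PySem.Dict.empty
  String.join (text.toList.map (fun ch => (table.get? ch).getD (String.ofList [ch])))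

-- ===== PRECONDITION & SPEC =====
-- Pre_: every character of text is kept (comma/digit/punctuation/space) or is a key of
-- coder; otherwise the Python A (and B) raise KeyError.
def Pre_applyCoder (text : String) (coder : List (String × String)) : Prop :=
  (text.toList.all (fun c =>
    c == ',' || pyDigits.contains c || pyPunct.contains c || c == ' ' ||
      coder.any (fun p => p.1 == String.ofList [c]))) = true
instance (text : String) (coder : List (String × String)) : Decidable (Pre_applyCoder text coder) := by unfold Pre_applyCoder; infer_instance

def pvWitness_applyCoder : String × (List (String × String)) :=
  ("a,", [("a", "b")])

def Spec_applyCoder (text : String) (coder : List (String × String)) (out : String) : Prop := out = applyCoder_alt text coder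
instance (text : String) (coder : List (String × String)) (out : String) : Decidable (Spec_applyCoder text coder out) := by unfold Spec_applyCoder; infer_instance

-- ===== CLAIM (what is proved, stated in full; the proofs are below) =====
def Claim_equal_applyCoder : Prop := ∀ (text : String) (coder : List (String × String)), Dom_applyCoder text coder → Pre_applyCoder text coder → Spec_applyCoder text coder (applyCoder text coder)

-- ===== LEMMAS AND PROOFS =====

-- looking up a key in the table built by the comprehension fold: the stored value
-- depends only on the key, so duplicates and iteration order are irrelevant
theorem get?_table_foldl (f : Char → String) (xs : List Char) (t : PySem.Dict Char String) (c : Char) :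
    (xs.foldl (fun t k => t.insert k (f k)) t).get? c
      = if c ∈ xs then some (f c) else t.get? c := by
  induction xs generalizing t with
  | nil => simp
  | cons k ks ih =>
    simp only [List.foldl_cons, ih, List.mem_cons]
    by_cases hks : c ∈ ks
    · simp [hks]
    · by_cases hck : c = k
      · subst hck; simp [hks, PySem.Dict.get?_insert_self]
      · rw [PySem.Dict.get?_insert_of_ne (hne := hck)]
        simp [hks, hck]

-- A's conditional-append loop is a map
theorem foldl_append_single (g : Char → String) (xs : List Char) (acc : List String) :
    xs.foldl (fun chars letter => chars ++ [g letter]) acc = acc ++ xs.map g := by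
  induction xs generalizing acc with
  | nil => simp
  | cons x xs ih => simp [ih]

-- ===== VERDICT (by name: the statement is the Claim_ definition above) =====
set_option maxRecDepth 10000 in
set_option maxHeartbeats 2000000 in
theorem applyCoder_spec : Claim_equal_applyCoder := by
  intro text coder _ _
  unfold Spec_applyCoder applyCoder applyCoder_alt
  show String.join
      (text.toList.foldl (fun chars letter =>
        if letter = ',' ∨ letter ∈ pyDigits then chars ++ [String.ofList [letter]]
        else if letter ∈ pyPunct ∨ letter = ' ' then chars ++ [String.ofList [letter]]
        else chars ++ [((PySem.Dict.ofList coder).get? (String.ofList [letter])).getD ""]) [])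
    = String.join (text.toList.map (fun ch =>
        (((PySem.Set.ofList text.toList).foldl (fun t c =>
            t.insert c (if c ∈ keepSet then String.ofList [c]
                        else (((PySem.Dict.ofList coder).get? (String.ofList [c])).getD "")))
          PySem.Dict.empty).get? ch).getD (String.ofList [ch])))
  have hstep :
      (fun (chars : List String) letter =>
        if letter = ',' ∨ letter ∈ pyDigits then chars ++ [String.ofList [letter]]
        else if letter ∈ pyPunct ∨ letter = ' ' then chars ++ [String.ofList [letter]]
        else chars ++ [((PySem.Dict.ofList coder).get? (String.ofList [letter])).getD ""])
      = (fun (chars : List String) letter => chars ++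
          [if letter = ',' ∨ letter ∈ pyDigits then String.ofList [letter]
           else if letter ∈ pyPunct ∨ letter = ' ' then String.ofList [letter]
           else ((PySem.Dict.ofList coder).get? (String.ofList [letter])).getD ""]) := by
    funext chars letter; split_ifs <;> rfl
  rw [hstep, foldl_append_single]
  simp only [List.nil_append]
  refine congrArg String.join (List.map_congr_left ?_)
  intro c hc
  rw [get?_table_foldl]
  have hmem : c ∈ PySem.Set.ofList text.toList := (PySem.Set.mem_ofList _ _).mpr hc
  simp only [hmem, if_true, Option.getD_some]
  by_cases hk : c ∈ keepSet
  · have hk' : c ∈ pyPunct ++ pyDigits ++ [' '] := by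
      simpa [keepSet, PySem.Set.mem_ofList] using hk
    have hkeep : c ∈ pyPunct ∨ c ∈ pyDigits ∨ c = ' ' := by
      simpa [List.mem_append] using hk'
    rcases hkeep with h | h | h
    · by_cases h1 : c = ',' ∨ c ∈ pyDigits
      · simp [hk, h1]
      · simp [hk, h1, h]
    · simp [hk, h]
    · subst h
      simp [show (' ' : Char) ∈ keepSet from by decide]
  · have h1 : ¬ (c = ',' ∨ c ∈ pyDigits) := by
      intro h
      apply hk
      rcases h with h | h
      · subst h; decide
      · simp [keepSet, PySem.Set.mem_ofList, List.mem_append, h]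
    have h2 : ¬ (c ∈ pyPunct ∨ c = ' ') := by
      intro h
      apply hk
      simp only [keepSet, PySem.Set.mem_ofList, List.mem_append, List.mem_singleton]
      tauto
    simp [hk, h1, h2]
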